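-- pv_equiv track=rewrite | github.com/Gsllchb/code-jam-solutions | src/even_digits.py | leftmost_odd
-- ===== SOURCE A (Python) =====
-- def leftmost_odd(num):
--     weight = -1
--     i = 0
--     while num > 0:
--         if (num % 10) % 2 == 1:
--             weight = i
--         num = num // 10
--         i += 1
--     return weight
-- ===== SOURCE B (Python) =====
-- def leftmost_odd(num):
--     if num <= 0:
--         return -1
--     rest = leftmost_odd(num // 10)
--     if rest != -1:
--         return rest + 1
--     return 0 if num % 2 == 1 else -1
-- ===== Notes on version B (the rewrite author's own statement) =====
-- stated objective: alternative
-- what changed: Replaces A's iterative least-to-most-significant loop that keeps overwriting the last odd position with structural recursion on the number with its last digit removed: the higher digits are asked first and their answer is shifted up, falling back to the parity of the units digit.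
import Mathlib
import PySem

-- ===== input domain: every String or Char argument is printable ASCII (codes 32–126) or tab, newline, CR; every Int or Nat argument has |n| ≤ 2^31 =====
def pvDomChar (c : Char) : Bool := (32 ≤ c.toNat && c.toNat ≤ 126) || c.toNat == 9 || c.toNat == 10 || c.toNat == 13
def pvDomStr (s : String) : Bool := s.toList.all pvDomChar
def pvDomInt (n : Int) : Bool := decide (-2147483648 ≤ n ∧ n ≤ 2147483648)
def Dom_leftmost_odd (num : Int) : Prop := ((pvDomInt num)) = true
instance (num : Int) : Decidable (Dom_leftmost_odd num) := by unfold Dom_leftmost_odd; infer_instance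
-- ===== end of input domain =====

-- B replaces A's LSB-to-MSB accumulate-last-odd loop by structural recursion on num // 10
-- that answers from the higher digits first (alternative decomposition, same cost).
-- ===== PORT A =====
def leftmostOddAux (num weight i : Int) : Int :=
  if num > 0 then
    leftmostOddAux (PySem.Int.floordiv num 10)
      (if PySem.Int.mod (PySem.Int.mod num 10) 2 = 1 then i else weight) (i + 1)
  else weight
termination_by num.toNat
decreasing_by
  rw [PySem.Int.floordiv_eq_ediv_of_pos (by omega)]
  omega

def leftmost_odd (num : Int) : Int := leftmostOddAux num (-1) 0

-- ===== PORT B =====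
def leftmost_odd_alt (num : Int) : Int :=
  if num ≤ 0 then -1
  else
    let rest := leftmost_odd_alt (PySem.Int.floordiv num 10)
    if rest ≠ -1 then rest + 1
    else if PySem.Int.mod num 2 = 1 then 0 else -1
termination_by num.toNat
decreasing_by
  rw [PySem.Int.floordiv_eq_ediv_of_pos (by omega)]
  omega

-- ===== PRECONDITION & SPEC =====
def Spec_leftmost_odd (num : Int) (out : Int) : Prop := out = leftmost_odd_alt num
instance (num : Int) (out : Int) : Decidable (Spec_leftmost_odd num out) := by unfold Spec_leftmost_odd; infer_instance

-- ===== CLAIM (what is proved, stated in full; the proofs are below) =====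
def Claim_equal_leftmost_odd : Prop := ∀ (num : Int), Dom_leftmost_odd num → Spec_leftmost_odd num (leftmost_odd num)

-- ===== LEMMAS AND PROOFS =====

-- ===== VERDICT (by name: the statement is the Claim_ definition above) =====
theorem alt_ge_neg_one (num : Int) : -1 ≤ leftmost_odd_alt num := by
  induction num using leftmost_odd_alt.induct
  all_goals rw [leftmost_odd_alt]
  all_goals simp only []
  all_goals split_ifs
  all_goals omega

theorem aux_eq (num weight i : Int) :
    leftmostOddAux num weight i =
      (if leftmost_odd_alt num = -1 then weight else leftmost_odd_alt num + i) := by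
  induction num, weight, i using leftmostOddAux.induct with
  | case2 num weight i h =>
    rw [leftmostOddAux, leftmost_odd_alt]
    simp only [if_neg h, if_pos (by omega : num ≤ 0)]
    simp
  | case1 num weight i h ih =>
    have hq := alt_ge_neg_one (PySem.Int.floordiv num 10)
    have hpar : PySem.Int.mod (PySem.Int.mod num 10) 2 = PySem.Int.mod num 2 := by
      rw [PySem.Int.mod_eq_emod_of_pos (a := num) (by omega),
          PySem.Int.mod_eq_emod_of_pos (by omega),
          PySem.Int.mod_eq_emod_of_pos (by omega)]
      exact Int.emod_emod_of_dvd num (by norm_num)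
    simp only [dite_eq_ite] at ih
    have hnum : leftmost_odd_alt num =
        (if leftmost_odd_alt (PySem.Int.floordiv num 10) ≠ -1 then
          leftmost_odd_alt (PySem.Int.floordiv num 10) + 1
         else if PySem.Int.mod num 2 = 1 then 0 else -1) := by
      rw [leftmost_odd_alt, if_neg (by omega : ¬ num ≤ 0)]
    rw [hpar] at ih
    rw [leftmostOddAux, if_pos h, hpar, ih, hnum]
    split_ifs
    all_goals first | omega | exact (‹False›).elim

theorem leftmost_odd_spec : Claim_equal_leftmost_odd := by
  intro num _
  show leftmost_odd num = leftmost_odd_alt num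
  have h := aux_eq num (-1) 0
  have := alt_ge_neg_one num
  unfold leftmost_odd
  rw [h]
  split_ifs with h1 <;> omega
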